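-- pv_equiv track=rewrite | github.com/AlexPerazzo/AdventofCode2022 | Advent Of Code 2022/Dec 8th, 2022.py | make_zeros_matrix
-- ===== SOURCE A (Python) =====
-- def make_zeros_matrix(matrix):
--     zeros_matrix = []
--     trees_in_row = []
--     trees_with_zero = []
--     count = 0
--     for row in matrix:
--         for number in row:
--             for trees in trees_in_row:
--                 if number > trees:
--                     count += 1
--             if count == len(trees_in_row):
--                 trees_with_zero.append("0")
--             else:
--                 trees_with_zero.append(number)
--             trees_in_row.append(number)
--             count = 0
--         zeros_matrix.append(trees_with_zero)
--         trees_with_zero = []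
--         trees_in_row = []
--
--     return zeros_matrix
-- ===== SOURCE B (Python) =====
-- def _row_zeros(row):
--     out = []
--     mx = None
--     for x in row:
--         if mx is None or x > mx:
--             out.append("0")
--             mx = x
--         else:
--             out.append(x)
--     return out
--
--
-- def make_zeros_matrix(matrix):
--     return [_row_zeros(row) for row in matrix]
-- ===== Notes on version B (the rewrite author's own statement) =====
-- stated objective: faster
-- what changed: Replaces the inner rescan of all predecessors (a count over the growing trees_in_row list) with a single running maximum per row, so each element is compared against one value instead of the whole prefix.
import Mathlib
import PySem

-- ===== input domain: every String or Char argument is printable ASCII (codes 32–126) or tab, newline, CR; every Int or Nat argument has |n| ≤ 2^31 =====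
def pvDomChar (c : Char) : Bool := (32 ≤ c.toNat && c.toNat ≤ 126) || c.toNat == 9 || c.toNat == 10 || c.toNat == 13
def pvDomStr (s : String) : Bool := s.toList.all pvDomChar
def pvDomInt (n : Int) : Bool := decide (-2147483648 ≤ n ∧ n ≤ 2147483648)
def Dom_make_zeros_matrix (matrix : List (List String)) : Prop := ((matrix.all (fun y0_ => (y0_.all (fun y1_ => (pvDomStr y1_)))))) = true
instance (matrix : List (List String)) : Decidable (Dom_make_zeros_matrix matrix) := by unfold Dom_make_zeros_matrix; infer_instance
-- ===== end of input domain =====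

-- B replaces A's inner rescan of all predecessors by a single running maximum per row (objective: faster).

-- ===== PORT A =====
-- one iteration of A's inner 'for number in row' loop; state = (trees_in_row, trees_with_zero)
def pvAStep (st : List String × List String) (number : String) : List String × List String :=
  -- 'for trees in trees_in_row: if number > trees: count += 1'
  let count := st.1.foldl (fun c trees => if trees < number then c + 1 else c) 0
  let trees_with_zero := if count = st.1.length then st.2 ++ ["0"] else st.2 ++ [number]
  (st.1 ++ [number], trees_with_zero)

def make_zeros_matrix (matrix : List (List String)) : List (List String) :=
  matrix.foldl (fun zeros_matrix row => zeros_matrix ++ [(row.foldl pvAStep ([], [])).2]) []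

-- ===== PORT B =====
-- one iteration of B's loop; state = (running maximum (None before the first element), output row)
def pvBStep (st : Option String × List String) (x : String) : Option String × List String :=
  match st.1 with
  | none => (some x, st.2 ++ ["0"])
  | some m => if m < x then (some x, st.2 ++ ["0"]) else (some m, st.2 ++ [x])

def pvRowZeros (row : List String) : List String :=
  (row.foldl pvBStep (none, [])).2

def make_zeros_matrix_alt (matrix : List (List String)) : List (List String) :=
  matrix.map pvRowZeros

-- ===== PRECONDITION & SPEC =====
def Spec_make_zeros_matrix (matrix : List (List String)) (out : List (List String)) : Prop := out = make_zeros_matrix_alt matrix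
instance (matrix : List (List String)) (out : List (List String)) : Decidable (Spec_make_zeros_matrix matrix out) := by unfold Spec_make_zeros_matrix; infer_instance

-- ===== CLAIM (what is proved, stated in full; the proofs are below) =====
def Claim_equal_make_zeros_matrix : Prop := ∀ (matrix : List (List String)), Dom_make_zeros_matrix matrix → Spec_make_zeros_matrix matrix (make_zeros_matrix matrix)

-- ===== LEMMAS AND PROOFS =====

-- the invariant tying A's prefix list to B's running maximum
def pvInv (l : List String) (mx : Option String) : Prop :=
  match mx with
  | none => l = []
  | some m => m ∈ l ∧ ∀ t ∈ l, t ≤ m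

lemma pv_count_fold (x : String) (l : List String) (c : Nat) :
    l.foldl (fun c trees => if trees < x then c + 1 else c) c
      = c + l.countP (fun t => decide (t < x)) := by
  induction l generalizing c with
  | nil => simp
  | cons a l ih =>
      simp only [List.foldl_cons, List.countP_cons, ih]
      by_cases h : a < x
      · rw [if_pos h, if_pos (by simpa using h)]; omega
      · rw [if_neg h, if_neg (by simpa using h)]; omega

lemma pv_count_all (x : String) (l : List String) :
    (l.foldl (fun c trees => if trees < x then c + 1 else c) 0 = l.length)
      ↔ ∀ t ∈ l, t < x := by
  rw [pv_count_fold]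
  simp only [Nat.zero_add]
  rw [List.countP_eq_length]
  simp

lemma pv_inner (row : List String) :
    ∀ (l : List String) (mx : Option String) (acc : List String), pvInv l mx →
      (row.foldl pvAStep (l, acc)).2 = (row.foldl pvBStep (mx, acc)).2 := by
  induction row with
  | nil => intro l mx acc _; rfl
  | cons x rest ih =>
      intro l mx acc hinv
      simp only [List.foldl_cons]
      cases mx with
      | none =>
          have hl : l = [] := hinv
          subst hl
          have : pvAStep ([], acc) x = ([x], acc ++ ["0"]) := by
            simp [pvAStep]
          rw [this]
          have : pvBStep (none, acc) x = (some x, acc ++ ["0"]) := rfl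
          rw [this]
          exact ih [x] (some x) (acc ++ ["0"]) ⟨List.mem_singleton.mpr rfl, by
            intro t ht; simp at ht; simp [ht]⟩
      | some m =>
          obtain ⟨hm, hall⟩ := hinv
          have hiff : (∀ t ∈ l, t < x) ↔ m < x := by
            constructor
            · intro h; exact h m hm
            · intro h t ht; exact lt_of_le_of_lt (hall t ht) h
          by_cases hmx : m < x
          · have hcnt : l.foldl (fun c trees => if trees < x then c + 1 else c) 0 = l.length :=
              (pv_count_all x l).mpr (hiff.mpr hmx)
            have hA : pvAStep (l, acc) x = (l ++ [x], acc ++ ["0"]) := by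
              simp only [pvAStep]
              rw [if_pos hcnt]
            have hB : pvBStep (some m, acc) x = (some x, acc ++ ["0"]) := by
              simp [pvBStep, hmx]
            rw [hA, hB]
            refine ih (l ++ [x]) (some x) (acc ++ ["0"]) ⟨by simp, ?_⟩
            intro t ht
            rcases List.mem_append.mp ht with h1 | h1
            · exact le_of_lt (lt_of_le_of_lt (hall t h1) hmx)
            · simp at h1; simp [h1]
          · have hcnt : ¬ (l.foldl (fun c trees => if trees < x then c + 1 else c) 0 = l.length) := by
              intro h; exact hmx (hiff.mp ((pv_count_all x l).mp h))
            have hA : pvAStep (l, acc) x = (l ++ [x], acc ++ [x]) := by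
              simp only [pvAStep]
              rw [if_neg hcnt]
            have hB : pvBStep (some m, acc) x = (some m, acc ++ [x]) := by
              simp [pvBStep, hmx]
            rw [hA, hB]
            refine ih (l ++ [x]) (some m) (acc ++ [x]) ⟨by simp [hm], ?_⟩
            intro t ht
            rcases List.mem_append.mp ht with h1 | h1
            · exact hall t h1
            · simp at h1; subst h1; exact le_of_not_gt hmx

lemma pv_row (row : List String) :
    (row.foldl pvAStep ([], [])).2 = pvRowZeros row :=
  pv_inner row [] none [] rfl

lemma pv_outer (matrix : List (List String)) :
    ∀ (zm : List (List String)),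
      matrix.foldl (fun zeros_matrix row => zeros_matrix ++ [(row.foldl pvAStep ([], [])).2]) zm
        = zm ++ matrix.map pvRowZeros := by
  induction matrix with
  | nil => intro zm; simp
  | cons r rest ih =>
      intro zm
      simp only [List.foldl_cons, List.map_cons]
      rw [ih, pv_row]
      simp

-- ===== VERDICT (by name: the statement is the Claim_ definition above) =====
theorem make_zeros_matrix_spec : Claim_equal_make_zeros_matrix := by
  intro matrix _
  unfold Spec_make_zeros_matrix make_zeros_matrix make_zeros_matrix_alt
  simpa using pv_outer matrix []
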